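-- pv_equiv track=rewrite | github.com/yofn/pyacm | contests/st.peterburg20/a.py | f
-- ===== SOURCE A (Python) =====
-- def f(l):
--     ss = sum(l)+1
--     dp = [True] + [False]*(ss-1)
--     for v in l:
--         for i in range(ss-1,v-1,-1): #KEY!
--             dp[i] = dp[i] or dp[i-v]
--     ct = sum(dp)
--     return ct*(ss*2-ct+1)//2
-- ===== SOURCE B (Python) =====
-- def f(l):
--     def reach(seg):
--         if not seg:
--             return {0}
--         if len(seg) == 1:
--             return {0, seg[0]}
--         m = len(seg) // 2
--         left = reach(seg[:m])
--         right = reach(seg[m:])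
--         return {a + b for a in left for b in right}
--     ss = sum(l) + 1
--     ct = len(reach(l))
--     return ct * (ss * 2 - ct + 1) // 2
-- ===== Notes on version B (the rewrite author's own statement) =====
-- stated objective: alternative
-- what changed: The linear boolean-array DP (reverse inner index loop over a dp table of size sum+1) is replaced by a divide-and-conquer recursion: the set of reachable subset sums of a segment is computed by splitting it in half, recursing, and taking the Cartesian pairwise-sum of the two result sets; the count is the size of the final set.
-- outside the precondition, e.g. on f([-1]): A returns 0, B returns -1; on f([-1, -1]): A returns -1, B returns -6; on f([-1, 5]): A raises IndexError, B returns 14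
import Mathlib
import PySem

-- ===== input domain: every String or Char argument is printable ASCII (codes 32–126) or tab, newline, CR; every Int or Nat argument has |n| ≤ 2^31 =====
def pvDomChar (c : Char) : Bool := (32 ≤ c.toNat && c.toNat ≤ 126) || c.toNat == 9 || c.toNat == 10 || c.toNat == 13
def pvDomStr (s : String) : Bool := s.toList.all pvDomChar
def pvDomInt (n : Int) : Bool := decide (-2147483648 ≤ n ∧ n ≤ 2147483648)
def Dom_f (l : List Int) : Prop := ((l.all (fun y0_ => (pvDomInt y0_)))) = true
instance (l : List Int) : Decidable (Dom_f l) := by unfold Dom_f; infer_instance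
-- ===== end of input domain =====

-- B replaces the linear boolean-array DP by a divide-and-conquer recursion: the set of
-- reachable subset sums of a segment is the pairwise sum of the sets for its two halves
-- (objective: alternative; no speed claim).

-- ===== PORT A =====
-- dp[i] = dp[i] or dp[i-v]  (one step of the inner loop)
def aStep (v : Int) (dp : List Bool) (i : Int) : List Bool :=
  PySem.List.pySetD dp i ((PySem.List.pyGetD dp i false) || (PySem.List.pyGetD dp (i - v) false))

-- for i in range(ss-1, v-1, -1): …  (the whole inner loop, for one v)
def fStep (ss : Int) (dp : List Bool) (v : Int) : List Bool :=
  (PySem.List.pyRange (ss - 1) (v - 1) (-1)).foldl (aStep v) dp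

def f (l : List Int) : Int :=
  let ss : Int := l.sum + 1
  let dp : List Bool := true :: List.replicate (ss - 1).toNat false
  let dp' := l.foldl (fStep ss) dp
  let ct : Int := (dp'.countP (· = true) : Int)   -- sum(dp) counts the Trues
  PySem.Int.floordiv (ct * (ss * 2 - ct + 1)) 2

-- ===== PORT B =====
-- reach(seg): the set of subset sums of seg, by splitting seg in half and taking
-- all pairwise sums of the two recursive results ({a+b for a in left for b in right}).
def reach : List Int → PySem.Set Int
  | [] => PySem.Set.ofList [0]
  | [v] => PySem.Set.ofList [0, v]
  | v :: w :: rest =>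
    let m := (v :: w :: rest).length / 2
    PySem.Set.ofList (((v :: w :: rest).take m |> reach).flatMap
      (fun a => (((v :: w :: rest).drop m |> reach)).map (fun b => a + b)))
termination_by seg => seg.length
decreasing_by
  · simp; omega
  · simp; omega

def f_alt (l : List Int) : Int :=
  let ss : Int := l.sum + 1
  let ct : Int := PySem.Set.len (reach l)
  PySem.Int.floordiv (ct * (ss * 2 - ct + 1)) 2

-- ===== PRECONDITION & SPEC =====
-- Pre_ restricts to the natural domain of non-negative elements: on a list with a negative
-- element A raises IndexError (dp[i-v] past the end) or returns an accidental value via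
-- Python's negative-index wraparound on a truncated dp list.
def Pre_f (l : List Int) : Prop := ∀ v ∈ l, 0 ≤ v
instance (l : List Int) : Decidable (Pre_f l) := by unfold Pre_f; infer_instance

def pvWitness_f : List Int := [1, 2, 3]

def Spec_f (l : List Int) (out : Int) : Prop := out = f_alt l
instance (l : List Int) (out : Int) : Decidable (Spec_f l out) := by unfold Spec_f; infer_instance

-- ===== CLAIM (what is proved, stated in full; the proofs are below) =====
def Claim_equal_f : Prop := ∀ (l : List Int), Dom_f l → Pre_f l → Spec_f l (f l)

-- ===== LEMMAS AND PROOFS =====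

-- SS l s: s is the sum of some subset of l (the common specification of both programs)
inductive SS : List Int → Int → Prop
  | nil : SS [] 0
  | skip {v : Int} {t : List Int} {s : Int} : SS t s → SS (v :: t) s
  | take {v : Int} {t : List Int} {s : Int} : SS t s → SS (v :: t) (v + s)

theorem SS_nil_iff (s : Int) : SS [] s ↔ s = 0 := by
  constructor
  · intro h; cases h; rfl
  · rintro rfl; exact SS.nil

theorem SS_cons_iff (v : Int) (t : List Int) (s : Int) :
    SS (v :: t) s ↔ SS t s ∨ ∃ s', SS t s' ∧ s = v + s' := by
  constructor
  · intro h
    cases h with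
    | skip h => exact Or.inl h
    | take h => exact Or.inr ⟨_, h, rfl⟩
  · rintro (h | ⟨s', h, rfl⟩)
    · exact SS.skip h
    · exact SS.take h

theorem SS_append (a b : List Int) (s : Int) :
    SS (a ++ b) s ↔ ∃ x y, SS a x ∧ SS b y ∧ s = x + y := by
  induction a generalizing s with
  | nil =>
    simp only [List.nil_append]
    constructor
    · intro h; exact ⟨0, s, SS.nil, h, by ring⟩
    · rintro ⟨x, y, hx, hy, rfl⟩
      rw [SS_nil_iff] at hx; subst hx; simpa using hy
  | cons v a ih =>
    rw [List.cons_append]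
    simp only [SS_cons_iff]
    constructor
    · rintro (h | ⟨s', h, rfl⟩)
      · obtain ⟨x, y, hx, hy, rfl⟩ := (ih _).mp h
        exact ⟨x, y, Or.inl hx, hy, rfl⟩
      · obtain ⟨x, y, hx, hy, rfl⟩ := (ih _).mp h
        exact ⟨v + x, y, Or.inr ⟨x, hx, rfl⟩, hy, by ring⟩
    · rintro ⟨x, y, (hx | ⟨x', hx, rfl⟩), hy, rfl⟩
      · exact Or.inl ((ih _).mpr ⟨x, y, hx, hy, rfl⟩)
      · exact Or.inr ⟨x' + y, (ih _).mpr ⟨x', y, hx, hy, rfl⟩, by ring⟩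

theorem SS_bound (l : List Int) (s : Int) (h : SS l s) (hnn : ∀ v ∈ l, 0 ≤ v) :
    0 ≤ s ∧ s ≤ l.sum := by
  induction h with
  | nil => simp
  | @skip v t s' h ih =>
    have := ih (fun x hx => hnn x (by simp [hx]))
    have hv : 0 ≤ v := hnn v (by simp)
    simp only [List.sum_cons]
    omega
  | @take v t s' h ih =>
    have := ih (fun x hx => hnn x (by simp [hx]))
    have hv : 0 ≤ v := hnn v (by simp)
    simp only [List.sum_cons]
    omega

-- B-side characterisation: reach computes exactly the subset sums
theorem mem_reach : ∀ (seg : List Int) (x : Int), x ∈ reach seg ↔ SS seg x := by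
  intro seg
  induction seg using reach.induct with
  | case1 =>
    intro x
    simp [reach, PySem.Set.mem_ofList, SS_nil_iff]
  | case2 v =>
    intro x
    simp only [reach, PySem.Set.mem_ofList, List.mem_cons,
      SS_cons_iff, SS_nil_iff, List.not_mem_nil, or_false]
    constructor
    · rintro (rfl | rfl)
      · exact Or.inl rfl
      · exact Or.inr ⟨0, rfl, by ring⟩
    · rintro (rfl | ⟨s', rfl, rfl⟩)
      · exact Or.inl rfl
      · exact Or.inr (by ring)
  | case3 v w rest m ihR ihL =>
    intro x
    rw [reach]
    simp only [PySem.Set.mem_ofList, List.mem_flatMap, List.mem_map]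
    constructor
    · rintro ⟨a, ha, b, hb, rfl⟩
      have hL := (ihL a).mp ha
      have hR := (ihR b).mp hb
      have := (SS_append _ _ (a + b)).mpr ⟨a, b, hL, hR, rfl⟩
      rwa [List.take_append_drop] at this
    · intro hx
      rw [← List.take_append_drop ((v :: w :: rest).length / 2) (v :: w :: rest), SS_append] at hx
      obtain ⟨a, b, ha, hb, rfl⟩ := hx
      exact ⟨a, (ihL a).mpr ha, b, (ihR b).mpr hb, rfl⟩

theorem nodup_reach (seg : List Int) : (reach seg).Nodup := by
  match seg with
  | [] => rw [reach]; exact PySem.Set.nodup_ofList _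
  | [v] => rw [reach]; exact PySem.Set.nodup_ofList _
  | v :: w :: rest => rw [reach]; exact PySem.Set.nodup_ofList _

-- A-side machinery: the inner loop, then the whole dp array tracked through a ghost bitmask
theorem getD_set' (l : List Bool) (i j : Nat) (a d : Bool) (hi : i < l.length) :
    (l.set i a).getD j d = if j = i then a else l.getD j d := by
  simp only [List.getD_eq_getElem?_getD, List.getElem?_set]
  by_cases h : j = i
  · subst h; simp [hi]
  · simp [h, Ne.symm h]

theorem inner_loop (v : Int) (hv : 0 ≤ v) :
    ∀ (n : ℕ) (hi : Int) (dp : List Bool), (hi - (v - 1)).toNat = n → hi < (dp.length : Int) →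
      ((PySem.List.pyRange hi (v - 1) (-1)).foldl (aStep v) dp).length = dp.length ∧
      ∀ j : ℕ, ((PySem.List.pyRange hi (v - 1) (-1)).foldl (aStep v) dp).getD j false =
        if v ≤ (j : Int) ∧ (j : Int) ≤ hi
        then dp.getD j false || dp.getD (j - v.toNat) false
        else dp.getD j false := by
  intro n
  induction n with
  | zero =>
    intro hi dp hn hlen
    have hle : hi ≤ v - 1 := by omega
    rw [PySem.List.pyRange_neg_one_eq_nil hle]
    refine ⟨rfl, ?_⟩
    intro j
    have : ¬ (v ≤ (j : Int) ∧ (j : Int) ≤ hi) := by omega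
    simp [this]
  | succ n ih =>
    intro hi dp hn hlen
    have hlt : v - 1 < hi := by omega
    rw [PySem.List.pyRange_neg_one_cons hlt]
    simp only [List.foldl_cons]
    have h0hi : 0 ≤ hi := by omega
    have hhiN : hi.toNat < dp.length := by omega
    have hdp1 : aStep v dp hi =
        dp.set hi.toNat (dp.getD hi.toNat false || dp.getD (hi.toNat - v.toNat) false) := by
      unfold aStep
      rw [PySem.List.pySetD_of_nonneg dp _ h0hi,
          PySem.List.pyGetD_eq_getElem dp false h0hi (by omega),
          PySem.List.pyGetD_eq_getElem dp false (by omega : (0:Int) ≤ hi - v) (by omega)]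
      have e2 : (hi - v).toNat = hi.toNat - v.toNat := by omega
      rw [List.getD_eq_getElem dp false hhiN,
          List.getD_eq_getElem dp false (by omega : hi.toNat - v.toNat < dp.length)]
      simp [e2]
    set dp1 := aStep v dp hi with hdp1def
    have hlen1 : dp1.length = dp.length := by rw [hdp1]; simp
    obtain ⟨ihlen, ihget⟩ := ih (hi - 1) dp1 (by omega) (by omega)
    constructor
    · rw [ihlen, hlen1]
    · intro j
      rw [ihget j]
      have hget1 : ∀ k : ℕ, dp1.getD k false =
          if k = hi.toNat then dp.getD hi.toNat false || dp.getD (hi.toNat - v.toNat) false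
          else dp.getD k false := by
        intro k
        rw [hdp1]
        rw [getD_set' dp hi.toNat k _ false hhiN]
      by_cases hcase : v ≤ (j : Int) ∧ (j : Int) ≤ hi - 1
      · have hc2 : v ≤ (j : Int) ∧ (j : Int) ≤ hi := ⟨hcase.1, by omega⟩
        rw [if_pos hcase, if_pos hc2, hget1 j, hget1 (j - v.toNat)]
        have hj : j ≠ hi.toNat := by omega
        have hjv : j - v.toNat ≠ hi.toNat := by omega
        rw [if_neg hj, if_neg hjv]
      · rw [if_neg hcase, hget1 j]
        by_cases hj : j = hi.toNat
        · subst hj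
          have : v ≤ ((hi.toNat : ℕ) : Int) ∧ ((hi.toNat : ℕ) : Int) ≤ hi := by
            constructor <;> omega
          rw [if_pos this, if_pos rfl]
        · rw [if_neg hj]
          have : ¬ (v ≤ (j : Int) ∧ (j : Int) ≤ hi) := by omega
          rw [if_neg this]

theorem mask_step_bit (m : Nat) (k : Nat) (j : Nat) :
    (m ||| (m <<< k)).testBit j = (m.testBit j || (decide (k ≤ j) && m.testBit (j - k))) := by
  simp [Nat.testBit_or, Nat.testBit_shiftLeft]

theorem outer_loop (ss : Int) :
    ∀ (rest : List Int) (dp : List Bool) (mask : Nat),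
      (∀ v ∈ rest, 0 ≤ v) →
      dp.length = ss.toNat →
      (∀ j : ℕ, mask.testBit j = dp.getD j false) →
      (∀ j : ℕ, mask.testBit j = true → (j : Int) + rest.sum ≤ ss - 1) →
      (rest.foldl (fStep ss) dp).length = ss.toNat ∧
      (∀ j : ℕ, (rest.foldl (fun m v => m ||| (m <<< v.toNat)) mask).testBit j
          = (rest.foldl (fStep ss) dp).getD j false) := by
  intro rest
  induction rest with
  | nil =>
    intro dp mask _ hlen hbit _
    exact ⟨hlen, hbit⟩
  | cons v tail ih =>
    intro dp mask hnn hlen hbit hbound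
    have hv : 0 ≤ v := hnn v (by simp)
    have htail : ∀ x ∈ tail, 0 ≤ x := fun x hx => hnn x (by simp [hx])
    have htsum : 0 ≤ tail.sum := List.sum_nonneg htail
    have hhilen : (ss - 1 : Int) < ((dp.length : ℕ) : Int) := by
      rw [hlen]; omega
    obtain ⟨hlen1, hget1⟩ :=
      inner_loop v hv (ss - 1 - (v - 1)).toNat (ss - 1) dp rfl hhilen
    simp only [List.foldl_cons]
    have hsum : (v :: tail).sum = v + tail.sum := by simp
    have hbit1 : ∀ j : ℕ, (mask ||| (mask <<< v.toNat)).testBit j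
        = (fStep ss dp v).getD j false := by
      intro j
      rw [mask_step_bit]
      unfold fStep
      rw [hget1 j]
      by_cases hcase : v ≤ (j : Int) ∧ (j : Int) ≤ ss - 1
      · rw [if_pos hcase]
        have hd : decide (v.toNat ≤ j) = true := by
          simp; omega
        rw [hd, hbit j, hbit (j - v.toNat)]
        simp
      · rw [if_neg hcase]
        by_cases hj : v ≤ (j : Int)
        · have hdead : mask.testBit (j - v.toNat) = false := by
            by_contra hc
            have hc' : mask.testBit (j - v.toNat) = true := by
              cases h : mask.testBit (j - v.toNat) <;> simp_all
            have := hbound (j - v.toNat) hc'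
            rw [hsum] at this
            have hcast : ((j - v.toNat : ℕ) : Int) = (j : Int) - v := by omega
            omega
          rw [hdead, hbit j]
          simp
        · have hd : decide (v.toNat ≤ j) = false := by
            simp; omega
          rw [hd, hbit j]
          simp
    have hbound1 : ∀ j : ℕ, (mask ||| (mask <<< v.toNat)).testBit j = true →
        (j : Int) + tail.sum ≤ ss - 1 := by
      intro j hj
      rw [mask_step_bit] at hj
      rcases Bool.or_eq_true_iff.mp hj with h | h
      · have := hbound j h
        rw [hsum] at this
        omega
      · rcases Bool.and_eq_true_iff.mp h with ⟨hd, hb⟩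
        have hvd : v.toNat ≤ j := by simpa using hd
        have := hbound (j - v.toNat) hb
        rw [hsum] at this
        have hcast : ((j - v.toNat : ℕ) : Int) = (j : Int) - v := by omega
        omega
    have hlen1' : (fStep ss dp v).length = ss.toNat := by
      unfold fStep at *
      rw [hlen1, hlen]
    exact ih (fStep ss dp v) (mask ||| (mask <<< v.toNat)) htail hlen1' hbit1 hbound1

theorem testBit_one (j : ℕ) : (1 : Nat).testBit j = decide (j = 0) := by
  cases j with
  | zero => decide
  | succ k => simp [Nat.testBit_add_one]

-- the ghost bitmask computes exactly the subset sums of the processed prefix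
theorem mask_SS : ∀ (rest acc : List Int) (mask : Nat),
    (∀ v ∈ rest, 0 ≤ v) →
    (∀ s : Int, SS acc s → 0 ≤ s) →
    (∀ j : ℕ, mask.testBit j = true ↔ SS acc (j : Int)) →
    ∀ j : ℕ, (rest.foldl (fun m v => m ||| (m <<< v.toNat)) mask).testBit j = true
        ↔ SS (acc ++ rest) (j : Int) := by
  intro rest
  induction rest with
  | nil =>
    intro acc mask _ _ hbit j
    simpa using hbit j
  | cons v tail ih =>
    intro acc mask hnn hpos hbit j
    have hv : 0 ≤ v := hnn v (by simp)
    have hSSsnoc : ∀ s : Int, SS (acc ++ [v]) s ↔ SS acc s ∨ ∃ x, SS acc x ∧ s = x + v := by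
      intro s
      rw [SS_append]
      constructor
      · rintro ⟨x, y, hx, hy, rfl⟩
        rw [SS_cons_iff] at hy
        rcases hy with hy | ⟨s', hy, rfl⟩
        · rw [SS_nil_iff] at hy; subst hy; exact Or.inl (by simpa using hx)
        · rw [SS_nil_iff] at hy; subst hy
          exact Or.inr ⟨x, hx, by ring⟩
      · rintro (h | ⟨x, hx, rfl⟩)
        · exact ⟨s, 0, h, SS.skip SS.nil, by ring⟩
        · exact ⟨x, v, hx, by simpa using SS.take (v := v) SS.nil, by ring⟩
    have hpos' : ∀ s : Int, SS (acc ++ [v]) s → 0 ≤ s := by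
      intro s hs
      rw [hSSsnoc] at hs
      rcases hs with h | ⟨x, hx, rfl⟩
      · exact hpos s h
      · have := hpos x hx; omega
    have hbit' : ∀ j : ℕ, (mask ||| (mask <<< v.toNat)).testBit j = true ↔ SS (acc ++ [v]) (j : Int) := by
      intro j
      rw [mask_step_bit, hSSsnoc]
      constructor
      · intro h
        rcases Bool.or_eq_true_iff.mp h with h | h
        · exact Or.inl ((hbit j).mp h)
        · rcases Bool.and_eq_true_iff.mp h with ⟨hd, hb⟩
          have hvd : v.toNat ≤ j := by simpa using hd
          have hx := (hbit (j - v.toNat)).mp hb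
          refine Or.inr ⟨((j - v.toNat : ℕ) : Int), hx, by omega⟩
      · rintro (h | ⟨x, hx, hxe⟩)
        · rw [Bool.or_eq_true_iff]; exact Or.inl ((hbit j).mpr h)
        · have hx0 : 0 ≤ x := hpos x hx
          have hvd : v.toNat ≤ j := by omega
          have hcast : ((j - v.toNat : ℕ) : Int) = x := by omega
          rw [Bool.or_eq_true_iff]
          refine Or.inr (Bool.and_eq_true_iff.mpr ⟨by simpa using hvd, ?_⟩)
          exact (hbit (j - v.toNat)).mpr (by rwa [hcast])
    have := ih (acc ++ [v]) (mask ||| (mask <<< v.toNat))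
      (fun x hx => hnn x (by simp [hx])) hpos' hbit' j
    simpa [List.foldl_cons, List.append_assoc] using this

-- counting: boolean positions of dp vs. size of the reach set
theorem countP_eq_filter_range (dp : List Bool) :
    dp.countP (· = true) = ((List.range dp.length).filter (fun j : ℕ => dp.getD j false)).length := by
  conv_lhs => rw [show dp = (List.range dp.length).map (fun j : ℕ => dp.getD j false) by
    apply List.ext_getElem
    · simp
    · intro i h1 h2
      simp [List.getD_eq_getElem?_getD, h1]]
  rw [List.countP_map, List.countP_eq_length_filter]
  congr 1
  apply List.filter_congr
  intro j _
  simp [Function.comp]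

theorem length_filter_range_eq (n : ℕ) (L : List Int) (hnd : L.Nodup)
    (hmem : ∀ x ∈ L, 0 ≤ x ∧ x < (n : Int)) :
    ((List.range n).filter (fun j : ℕ => decide ((j : Int) ∈ L))).length = L.length := by
  have hBnd : (L.map Int.toNat).Nodup := by
    refine List.Nodup.map_on ?_ hnd
    intro x hx y hy hxy
    have := (hmem x hx).1
    have := (hmem y hy).1
    omega
  have hperm : List.Perm ((List.range n).filter (fun j : ℕ => decide ((j : Int) ∈ L))) (L.map Int.toNat) := by
    rw [List.perm_ext_iff_of_nodup (List.Nodup.filter _ (List.nodup_range)) hBnd]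
    intro j
    simp only [List.mem_filter, List.mem_range, List.mem_map, decide_eq_true_eq]
    constructor
    · rintro ⟨hjn, hjL⟩
      exact ⟨(j : Int), hjL, by omega⟩
    · rintro ⟨x, hx, rfl⟩
      have := hmem x hx
      constructor
      · omega
      · have : ((x.toNat : ℕ) : Int) = x := by omega
        rwa [this]
  rw [hperm.length_eq, List.length_map]

theorem f_eq_falt (l : List Int) (hpre : ∀ v ∈ l, 0 ≤ v) : f l = f_alt l := by
  have hsum : 0 ≤ l.sum := List.sum_nonneg hpre
  set ss : Int := l.sum + 1 with hss
  set dp0 : List Bool := true :: List.replicate (ss - 1).toNat false with hdp0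
  have hlen0 : dp0.length = ss.toNat := by simp [hdp0]; omega
  have hbit0 : ∀ j : ℕ, (1 : Nat).testBit j = dp0.getD j false := by
    intro j
    rw [testBit_one]
    cases j with
    | zero => simp [hdp0]
    | succ k => simp [hdp0, List.getD]
  have hbound0 : ∀ j : ℕ, (1 : Nat).testBit j = true → (j : Int) + l.sum ≤ ss - 1 := by
    intro j hj
    rw [testBit_one] at hj
    have : j = 0 := by simpa using hj
    omega
  obtain ⟨hlenF, hpt⟩ := outer_loop ss l dp0 1 hpre hlen0 hbit0 hbound0
  have hbit1 : ∀ j : ℕ, (1 : Nat).testBit j = true ↔ SS [] (j : Int) := by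
    intro j
    rw [testBit_one, SS_nil_iff]
    constructor
    · intro h; have : j = 0 := by simpa using h
      omega
    · intro h; have : j = 0 := by omega
      simp [this]
  have hmk := mask_SS l [] 1 hpre (by intro s hs; rw [SS_nil_iff] at hs; omega) hbit1
  -- dp'.getD j ↔ (j : Int) ∈ reach l
  have hdpmem : ∀ j : ℕ, (l.foldl (fStep ss) dp0).getD j false = decide ((j : Int) ∈ reach l) := by
    intro j
    rw [← hpt j]
    cases h : (l.foldl (fun (m : Nat) (v : Int) => m ||| (m <<< v.toNat)) 1).testBit j with
    | false =>
      symm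
      simp only [decide_eq_false_iff_not, mem_reach]
      intro hSS
      have := (hmk j).mpr (by simpa using hSS)
      rw [h] at this
      exact Bool.false_ne_true this
    | true =>
      symm
      simp only [decide_eq_true_eq, mem_reach]
      simpa using (hmk j).mp h
  -- count
  have hct : (l.foldl (fStep ss) dp0).countP (· = true) = (reach l).length := by
    rw [countP_eq_filter_range, hlenF]
    have hfc : (List.range ss.toNat).filter (fun j : ℕ => (l.foldl (fStep ss) dp0).getD j false)
        = (List.range ss.toNat).filter (fun j : ℕ => decide ((j : Int) ∈ reach l)) := by
      apply List.filter_congr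
      intro j _
      rw [hdpmem j]
    rw [hfc]
    apply length_filter_range_eq
    · exact nodup_reach l
    · intro x hx
      have hb := SS_bound l x ((mem_reach l x).mp hx) hpre
      constructor
      · exact hb.1
      · omega
  simp only [f, f_alt, PySem.Set.len]
  rw [← hss, ← hdp0, hct]

-- ===== VERDICT (by name: the statement is the Claim_ definition above) =====
theorem f_spec : Claim_equal_f := by
  intro l _ hpre
  unfold Spec_f
  exact f_eq_falt l hpre
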